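-- pv_equiv track=rewrite | github.com/WSIZ-Bielsko/python-2026 | python_2026/gg1/week6/count_empty_spaces.py | find_min_star_distance
-- ===== SOURCE A (Python) =====
-- def find_min_star_distance(s: str) -> int:
--     """
--     The input string contains only '.' and '*'.
--     Finds the smallest number of '.' that separate two adjacent `*`'s. Returns 0
--     if the string contains fewer than two '*'.
--     """
--     if s.count('*') < 2:
--         return 0
--
--     # *....*...**..
--     # ...*....*....
--     # ....*........
--
--     answer = len(s)
--     seen_star = False
--     n_dots = 0
--     for c in s:
--         if c == '*':
--             if not seen_star:
--                 seen_star = True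
--             else:
--                 answer = min(answer, n_dots)
--             n_dots = 0
--         else:
--             n_dots += 1
--     return answer
-- ===== SOURCE B (Python) =====
-- def find_min_star_distance(s: str) -> int:
--     """
--     The input string contains only '.' and '*'.
--     Finds the smallest number of '.' that separate two adjacent `*`'s. Returns 0
--     if the string contains fewer than two '*'.
--     """
--     stars = [i for i, c in enumerate(s) if c == '*']
--     if len(stars) < 2:
--         return 0
--     return min(b - a - 1 for a, b in zip(stars, stars[1:]))
-- ===== Notes on version B (the rewrite author's own statement) =====
-- stated objective: simpler
-- what changed: Replaced A's stateful scan (seen_star flag, running dot counter, running minimum) by materializing the list of star indices and taking the min of consecutive index differences minus one.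
import Mathlib
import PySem

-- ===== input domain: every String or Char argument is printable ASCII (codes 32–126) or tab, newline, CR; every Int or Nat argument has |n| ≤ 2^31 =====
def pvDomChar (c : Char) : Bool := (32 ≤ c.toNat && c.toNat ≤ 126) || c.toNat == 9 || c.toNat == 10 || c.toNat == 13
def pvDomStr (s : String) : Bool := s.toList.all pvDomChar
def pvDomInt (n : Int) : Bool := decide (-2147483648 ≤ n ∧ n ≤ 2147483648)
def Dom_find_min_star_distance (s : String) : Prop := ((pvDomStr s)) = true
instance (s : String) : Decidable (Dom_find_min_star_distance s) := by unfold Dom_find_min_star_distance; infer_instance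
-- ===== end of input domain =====

-- B replaces A's stateful scan (seen-star flag, running dot counter, running minimum)
-- by a table of star indices and the min of consecutive index differences; objective: simpler.

-- ===== PORT A =====
-- the for-loop of A, state (answer, seen_star, n_dots)
def pvLoopA : List Char → Int → Bool → Int → Int
  | [], answer, _, _ => answer
  | c :: rest, answer, seen_star, n_dots =>
    if c = '*' then
      if !seen_star then pvLoopA rest answer true 0
      else pvLoopA rest (min answer n_dots) true 0
    else pvLoopA rest answer seen_star (n_dots + 1)

def find_min_star_distance (s : String) : Int :=
  if (PySem.Str.count s "*" : Int) < 2 then 0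
  else pvLoopA s.toList (PySem.Str.len s) false 0

-- ===== PORT B =====
def find_min_star_distance_alt (s : String) : Int :=
  let stars := (PySem.List.enumerate s.toList).filterMap
    (fun ic => if ic.2 = '*' then some ic.1 else none)
  if stars.length < 2 then 0
  else ((PySem.List.min? ((stars.zip stars.tail).map (fun ab => ab.2 - ab.1 - 1))
          (fun x => x)).getD 0)

-- ===== PRECONDITION & SPEC =====
def Spec_find_min_star_distance (s : String) (out : Int) : Prop := out = find_min_star_distance_alt s
instance (s : String) (out : Int) : Decidable (Spec_find_min_star_distance s out) := by unfold Spec_find_min_star_distance; infer_instance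

-- ===== CLAIM (what is proved, stated in full; the proofs are below) =====
def Claim_equal_find_min_star_distance : Prop := ∀ (s : String), Dom_find_min_star_distance s → Spec_find_min_star_distance s (find_min_star_distance s)

-- ===== LEMMAS AND PROOFS =====

-- star indices of l, counting from i (what B's filterMap over enumerate computes)
def pvStars : List Char → Int → List Int
  | [], _ => []
  | c :: r, i => if c = '*' then i :: pvStars r (i + 1) else pvStars r (i + 1)

-- the gap values A's loop records after the first star, with n_dots = nd on entry
def pvGaps : List Char → Int → List Int
  | [], _ => []
  | c :: r, nd => if c = '*' then nd :: pvGaps r 0 else pvGaps r (nd + 1)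

-- consecutive differences minus one
def pvDiffs : List Int → List Int
  | a :: b :: r => (b - a - 1) :: pvDiffs (b :: r)
  | _ => []

theorem pvStars_eq (l : List Char) (i : Int) :
    (PySem.List.enumerate l i).filterMap
      (fun ic => if ic.2 = '*' then some ic.1 else none) = pvStars l i := by
  induction l generalizing i with
  | nil => simp [pvStars]
  | cons c r ih =>
      simp only [PySem.List.enumerate_cons, List.filterMap_cons, pvStars]
      by_cases h : c = '*' <;> simp [h, ih]

theorem pvDiffs_eq_zip (l : List Int) :
    (l.zip l.tail).map (fun ab => ab.2 - ab.1 - 1) = pvDiffs l := by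
  induction l with
  | nil => simp [pvDiffs]
  | cons a r ih =>
      cases r with
      | nil => simp [pvDiffs]
      | cons b r' =>
          simp only [List.tail_cons, List.zip_cons_cons, List.map_cons, pvDiffs]
          exact congrArg _ ih

theorem pvGaps_eq_diffs (l : List Char) (p i : Int) :
    pvDiffs (p :: pvStars l i) = pvGaps l (i - p - 1) := by
  induction l generalizing p i with
  | nil => simp [pvStars, pvGaps, pvDiffs]
  | cons c r ih =>
      by_cases h : c = '*'
      · have h0 : (i + 1) - i - 1 = (0 : Int) := by ring
        simp only [pvStars, pvGaps, if_pos h, pvDiffs]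
        rw [ih i (i + 1), h0]
      · have h1 : (i + 1) - p - 1 = (i - p - 1) + 1 := by ring
        simp only [pvStars, pvGaps, if_neg h]
        rw [ih p (i + 1), h1]

theorem pvLoopA_true (l : List Char) (ans nd : Int) :
    pvLoopA l ans true nd = List.foldl min ans (pvGaps l nd) := by
  induction l generalizing ans nd with
  | nil => simp [pvLoopA, pvGaps]
  | cons c r ih =>
      by_cases h : c = '*'
      · simp [pvLoopA, pvGaps, h, ih]
      · simp [pvLoopA, pvGaps, h, ih]

theorem pvLoopA_false (l : List Char) (ans nd i : Int) :
    pvLoopA l ans false nd = List.foldl min ans (pvDiffs (pvStars l i)) := by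
  induction l generalizing nd i with
  | nil => simp [pvLoopA, pvStars, pvDiffs]
  | cons c r ih =>
      by_cases h : c = '*'
      · have h0 : (i + 1) - i - 1 = (0 : Int) := by ring
        simp only [pvLoopA, if_pos h, Bool.not_false, if_pos, pvStars]
        rw [pvLoopA_true, pvGaps_eq_diffs r i (i + 1), h0]
      · simp only [pvLoopA, if_neg h, pvStars]
        exact ih (nd + 1) (i + 1)

theorem pvStars_length (l : List Char) (i : Int) :
    (pvStars l i).length = l.count '*' := by
  induction l generalizing i with
  | nil => simp [pvStars]
  | cons c r ih =>
      by_cases h : c = '*'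
      · simp [pvStars, h, ih]
      · simp [pvStars, h, ih]

theorem pvStars_bounds (l : List Char) (i : Int) :
    ∀ p ∈ pvStars l i, i ≤ p ∧ p < i + l.length := by
  induction l generalizing i with
  | nil => simp [pvStars]
  | cons c r ih =>
      intro p hp
      by_cases h : c = '*'
      · simp only [pvStars, if_pos h, List.mem_cons] at hp
        rcases hp with rfl | hp
        · simp only [List.length_cons]; push_cast; omega
        · have := ih (i + 1) p hp
          simp only [List.length_cons]
          push_cast
          omega
      · simp only [pvStars, if_neg h] at hp
        have := ih (i + 1) p hp
        simp only [List.length_cons]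
        push_cast
        omega

theorem pvCount_go_single (l : List Char) (fuel acc : Nat) (h : l.length ≤ fuel) :
    PySem.Chars.count.go ['*'] fuel l acc = acc + l.count '*' := by
  induction l generalizing fuel acc with
  | nil => cases fuel <;> simp [PySem.Chars.count.go]
  | cons c t ih =>
      cases fuel with
      | zero => simp at h
      | succ f =>
          have hf : t.length ≤ f := by simp at h; omega
          rw [PySem.Chars.count.go]
          by_cases hc : c = '*'
          · have hpre : List.isPrefixOf ['*'] (c :: t) = true := by
              simp [List.isPrefixOf, hc]
            simp only [hpre, if_true, List.length_cons, List.drop_succ_cons, List.length_nil, List.drop_zero]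
            rw [ih f (acc + 1) hf]
            simp [hc]
            omega
          · have hpre : List.isPrefixOf ['*'] (c :: t) = false := by
              simp [List.isPrefixOf]
              exact fun hh => hc hh.symm
            simp only [hpre, Bool.false_eq_true, if_false]
            rw [ih f acc hf]
            simp [hc]

theorem pvStrCount_star (s : String) :
    PySem.Str.count s "*" = s.toList.count '*' := by
  rw [PySem.Str.count_eq]
  show PySem.Chars.count s.toList ['*'] = _
  rw [PySem.Chars.count]
  simp only [List.isEmpty_cons, if_false, Bool.false_eq_true]
  simpa using pvCount_go_single s.toList s.toList.length 0 le_rfl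

-- ===== VERDICT (by name: the statement is the Claim_ definition above) =====
theorem find_min_star_distance_spec : Claim_equal_find_min_star_distance := by
  intro s _
  unfold Spec_find_min_star_distance find_min_star_distance find_min_star_distance_alt
  simp only [pvStars_eq]
  have hlen : (pvStars s.toList 0).length = s.toList.count '*' := pvStars_length _ _
  by_cases hlt : (pvStars s.toList 0).length < 2
  · have : (PySem.Str.count s "*" : Int) < 2 := by
      rw [pvStrCount_star]; rw [hlen] at hlt; exact_mod_cast hlt
    rw [if_pos this, if_pos hlt]
  · have hA : ¬ (PySem.Str.count s "*" : Int) < 2 := by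
      rw [pvStrCount_star]; rw [hlen] at hlt
      exact_mod_cast hlt
    simp only [if_neg hA, if_neg hlt]
    obtain ⟨p0, p1, rest, hst⟩ : ∃ p0 p1 rest, pvStars s.toList 0 = p0 :: p1 :: rest := by
      rcases hs : pvStars s.toList 0 with _ | ⟨p0, _ | ⟨p1, rest⟩⟩
      · exact absurd (by rw [hs]; simp) hlt
      · exact absurd (by rw [hs]; simp) hlt
      · exact ⟨p0, p1, rest, rfl⟩
    rw [hst, pvDiffs_eq_zip]
    have hb0 : 0 ≤ p0 := by
      have := pvStars_bounds s.toList 0 p0 (by rw [hst]; simp)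
      omega
    have hb1 : p1 < (s.toList.length : Int) := by
      have := pvStars_bounds s.toList 0 p1 (by rw [hst]; simp)
      omega
    have hd : pvDiffs (p0 :: p1 :: rest) = (p1 - p0 - 1) :: pvDiffs (p1 :: rest) := rfl
    rw [hd, PySem.List.min?_id_cons, Option.getD_some]
    rw [pvLoopA_false s.toList (PySem.Str.len s) 0 0, hst, hd]
    simp only [List.foldl_cons]
    have hmin : min (PySem.Str.len s) (p1 - p0 - 1) = p1 - p0 - 1 := by
      rw [PySem.Str.len_eq]
      apply min_eq_right
      omega
    rw [hmin]
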